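-- pv_equiv track=rewrite | github.com/tyumentsev4/cdma | cdma.py | message_to_signs
-- ===== SOURCE A (Python) =====
-- def message_to_signs(message: str) -> list[int]:
--     """Преобразует сообщение в знаки (+1 и -1), используя двоичный код ASCII.
--
--     Args:
--         message (str): Сообщение для кодирования.
--
--     Returns:
--         list[int]: Список из +1 и -1, представляющих двоичный код сообщения.
--     """
--     signs: list[int] = []
--     for char in message:
--         ascii_code = ord(char)
--         binary_representation = format(ascii_code, "08b")
--         for bit in binary_representation:
--             signs.append(+1 if bit == "1" else -1)
--     return signs
-- ===== SOURCE B (Python) =====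
-- # Lookup-table approach: a 256-entry sign table is built once by prefix doubling
-- # (no bit arithmetic, no string formatting); encoding is then one table fetch per byte.
-- _SIGNS: list[list[int]] = [[]]
-- for _ in range(8):
--     _SIGNS = [[-1] + p for p in _SIGNS] + [[1] + p for p in _SIGNS]
--
--
-- def message_to_signs(message: str) -> list[int]:
--     """Преобразует сообщение в знаки (+1 и -1), используя двоичный код ASCII."""
--     signs: list[int] = []
--     for char in message:
--         signs += _SIGNS[ord(char)]
--     return signs
-- ===== Notes on version B (the rewrite author's own statement) =====
-- stated objective: alternative
-- what changed: B replaces the per-character format/bit loop with a 256-entry lookup table of 8-sign chunks built once by prefix doubling, so the inner per-bit loop disappears from the encoding pass (one table fetch per character).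
import Mathlib
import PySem

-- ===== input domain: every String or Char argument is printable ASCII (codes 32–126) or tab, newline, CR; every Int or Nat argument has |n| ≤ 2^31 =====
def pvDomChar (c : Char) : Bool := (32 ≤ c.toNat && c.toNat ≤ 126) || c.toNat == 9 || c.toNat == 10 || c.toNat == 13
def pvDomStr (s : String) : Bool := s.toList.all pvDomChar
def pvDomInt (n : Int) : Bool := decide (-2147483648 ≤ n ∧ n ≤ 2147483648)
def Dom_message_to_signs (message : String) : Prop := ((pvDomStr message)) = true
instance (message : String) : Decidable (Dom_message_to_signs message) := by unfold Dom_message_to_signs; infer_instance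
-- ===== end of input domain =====

-- B replaces A's per-character format/bit loop by a 256-entry sign table built once by prefix doubling.
-- ===== PORT A =====
-- A: per character, format(ord(c), "08b") — binary digits left-padded with '0' to width 8 —
-- then append +1/-1 per bit character.
def message_to_signs (message : String) : List Int :=
  message.toList.foldl (fun signs char =>
    let ascii_code : Int := (char.toNat : Int)
    let rep := PySem.Int.toBinChars ascii_code
    let binary_representation := List.replicate (8 - rep.length) '0' ++ rep
    binary_representation.foldl
      (fun s bit => s ++ [if bit = '1' then (1 : Int) else -1]) signs) []

-- ===== PORT B =====
-- B: the 256-entry table built once by prefix doubling, then one fetch per character.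
-- _SIGNS[ord(char)] is in range on Dom (codes ≤ 126); out of range Python raises, ported as getD [].
def pvSignTable : List (List Int) :=
  (List.range 8).foldl
    (fun T _ => T.map (fun p => -1 :: p) ++ T.map (fun p => 1 :: p)) [[]]

def message_to_signs_alt (message : String) : List Int :=
  message.toList.foldl (fun signs char => signs ++ pvSignTable.getD char.toNat []) []

-- ===== PRECONDITION & SPEC =====
def Spec_message_to_signs (message : String) (out : List Int) : Prop := out = message_to_signs_alt message
instance (message : String) (out : List Int) : Decidable (Spec_message_to_signs message out) := by unfold Spec_message_to_signs; infer_instance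

-- ===== CLAIM (what is proved, stated in full; the proofs are below) =====
def Claim_equal_message_to_signs : Prop := ∀ (message : String), Dom_message_to_signs message → Spec_message_to_signs message (message_to_signs message)

-- ===== LEMMAS AND PROOFS =====

-- per-character agreement for every code below 256 (Dom's characters all are)
set_option maxRecDepth 8192 in
theorem perChar_eq : ∀ n : Nat, n < 256 →
    (List.replicate (8 - (PySem.Int.toBinChars (n : Int)).length) '0'
       ++ PySem.Int.toBinChars (n : Int)).map
        (fun bit => if bit = '1' then (1 : Int) else -1)
      = pvSignTable.getD n [] := by
  decide

theorem folds_eq (l : List Char) (h : ∀ c ∈ l, c.toNat < 256) :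
    ∀ acc : List Int,
    l.foldl (fun signs char =>
      let ascii_code : Int := (char.toNat : Int)
      let rep := PySem.Int.toBinChars ascii_code
      let binary_representation := List.replicate (8 - rep.length) '0' ++ rep
      binary_representation.foldl
        (fun s bit => s ++ [if bit = '1' then (1 : Int) else -1]) signs) acc
    = l.foldl (fun signs char => signs ++ pvSignTable.getD char.toNat []) acc := by
  induction l with
  | nil => intro acc; rfl
  | cons c cs ih =>
    intro acc
    simp only [List.foldl_cons]
    rw [ih (fun x hx => h x (List.mem_cons_of_mem _ hx))]
    congr 1
    simp only [PySem.List.foldl_append_singleton_eq_map]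
    rw [perChar_eq c.toNat (h c (List.mem_cons_self ..))]

-- ===== VERDICT (by name: the statement is the Claim_ definition above) =====
theorem message_to_signs_spec : Claim_equal_message_to_signs := by
  intro message h
  unfold Spec_message_to_signs message_to_signs message_to_signs_alt
  refine folds_eq _ (fun c hc => ?_) []
  have := List.all_eq_true.mp h c hc
  simp only [pvDomChar, Bool.or_eq_true, Bool.and_eq_true, decide_eq_true_eq,
    beq_iff_eq] at this
  omega
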